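-- pv_equiv track=rewrite | github.com/Fuatorium/PythonAllAlgorithms | Classical Encryption Algorithms/Pigpen Cipher.py | pigpen_cipher
-- ===== SOURCE A (Python) =====
-- def pigpen_cipher(text):
--     pigpen_dict = {
--         'A': '🅰', 'B': '🅱', 'C': '🅲', 'D': '🅳', 'E': '🅴', 'F': '🅵',
--         'G': '🅶', 'H': '🅷', 'I': '🅸', 'J': '🅹', 'K': '🅺', 'L': '🅻',
--         'M': '🅼', 'N': '🅽', 'O': '🅾', 'P': '🅿', 'Q': '🆀', 'R': '🆁',
--         'S': '🆂', 'T': '🆃', 'U': '🆄', 'V': '🆅', 'W': '🆆', 'X': '🆇',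
--         'Y': '🆈', 'Z': '🆉'
--     }
--
--     result = ''.join(pigpen_dict.get(char.upper(), char) for char in text)
--     return result
-- ===== SOURCE B (Python) =====
-- def pigpen_cipher(text):
--     # arithmetic mapping: the 26 symbols are contiguous codepoints U+1F170..U+1F189
--     out = []
--     for ch in text:
--         u = ch.upper()
--         if len(u) == 1 and 'A' <= u <= 'Z':
--             out.append(chr(0x1F170 + ord(u) - 0x41))
--         else:
--             out.append(ch)
--     return ''.join(out)
-- ===== Notes on version B (the rewrite author's own statement) =====
-- stated objective: idiomatic
-- what changed: B drops the 26-entry lookup table and computes each cipher symbol arithmetically from the uppercased character's codepoint (the symbols are contiguous at U+1F170), guarded so multi-char uppercasings and non-letters pass through unchanged.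
import Mathlib
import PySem

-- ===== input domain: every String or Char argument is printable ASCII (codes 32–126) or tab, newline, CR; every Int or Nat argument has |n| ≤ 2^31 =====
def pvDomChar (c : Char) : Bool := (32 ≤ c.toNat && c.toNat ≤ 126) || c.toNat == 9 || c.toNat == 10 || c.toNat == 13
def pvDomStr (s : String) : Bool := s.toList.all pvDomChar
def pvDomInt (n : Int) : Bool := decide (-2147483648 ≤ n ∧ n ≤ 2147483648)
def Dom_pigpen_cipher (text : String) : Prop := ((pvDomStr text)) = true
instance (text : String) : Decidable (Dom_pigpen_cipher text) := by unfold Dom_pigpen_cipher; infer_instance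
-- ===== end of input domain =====

-- B replaces A's 26-entry lookup table with an arithmetic per-character mapping (idiomatic; same cost).


-- ===== PORT A =====
-- the literal 26-entry dict of A (single-character keys/values as lists of chars)
def pigpenDict : PySem.Dict (List Char) (List Char) := PySem.Dict.ofList
  [(['A'],['🅰']), (['B'],['🅱']), (['C'],['🅲']), (['D'],['🅳']), (['E'],['🅴']), (['F'],['🅵']),
   (['G'],['🅶']), (['H'],['🅷']), (['I'],['🅸']), (['J'],['🅹']), (['K'],['🅺']), (['L'],['🅻']),
   (['M'],['🅼']), (['N'],['🅽']), (['O'],['🅾']), (['P'],['🅿']), (['Q'],['🆀']), (['R'],['🆁']),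
   (['S'],['🆂']), (['T'],['🆃']), (['U'],['🆄']), (['V'],['🆅']), (['W'],['🆆']), (['X'],['🆇']),
   (['Y'],['🆈']), (['Z'],['🆉'])]

-- ''.join(pigpen_dict.get(char.upper(), char) for char in text)
def pigpen_cipher (text : String) : String :=
  String.ofList (text.toList.flatMap (fun c => pigpenDict.getD (PySem.Chars.upper [c]) [c]))

-- ===== PORT B =====
-- u = ch.upper(); if len(u)==1 and 'A' <= u <= 'Z': chr(0x1F170 + ord(u) - 0x41) else ch
def pigpenAltChar (c : Char) : List Char :=
  match PySem.Chars.upper [c] with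
  | [u] => if 'A' ≤ u ∧ u ≤ 'Z' then [Char.ofNat (0x1F170 + u.toNat - 0x41)] else [c]
  | _ => [c]

def pigpen_cipher_alt (text : String) : String :=
  String.ofList (text.toList.flatMap pigpenAltChar)

-- ===== PRECONDITION & SPEC =====
def Spec_pigpen_cipher (text : String) (out : String) : Prop := out = pigpen_cipher_alt text
instance (text : String) (out : String) : Decidable (Spec_pigpen_cipher text out) := by unfold Spec_pigpen_cipher; infer_instance

-- ===== CLAIM (what is proved, stated in full; the proofs are below) =====
def Claim_equal_pigpen_cipher : Prop := ∀ (text : String), Dom_pigpen_cipher text → Spec_pigpen_cipher text (pigpen_cipher text)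

-- ===== LEMMAS AND PROOFS =====
-- per-character agreement on every code point the domain admits (codes 0..126), by exhaustive evaluation
set_option maxRecDepth 4096 in
theorem pigpen_char_eq : ∀ n < 127,
    pigpenDict.getD (PySem.Chars.upper [Char.ofNat n]) [Char.ofNat n] = pigpenAltChar (Char.ofNat n) := by
  decide

-- ===== VERDICT (by name: the statement is the Claim_ definition above) =====
theorem pigpen_cipher_spec : Claim_equal_pigpen_cipher := by
  intro text hdom
  unfold Spec_pigpen_cipher pigpen_cipher pigpen_cipher_alt
  have hall : ∀ c ∈ text.toList, pvDomChar c = true := by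
    simpa [Dom_pigpen_cipher, pvDomStr, List.all_eq_true] using hdom
  congr 1
  simp only [List.flatMap_def]
  rw [List.map_congr_left]
  intro c hc
  have hb : c.toNat < 127 := by
    have := hall c hc
    simp [pvDomChar] at this
    omega
  have := pigpen_char_eq c.toNat hb
  rwa [Char.ofNat_toNat] at this
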